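-- pv_equiv track=rewrite | github.com/jcalebsmith/proposal-rcdc-assignment | analyze_failures.py | expand_text_with_synonyms
-- ===== SOURCE A (Python) =====
-- from typing import Dict, List, Sequence, Set, Tuple
--
-- def expand_text_with_synonyms(text: str, synonyms: Dict[str, List[str]]) -> str:
--     if not text:
--         return text
--     text_lower = text.lower()
--     expansions: List[str] = []
--     for term, syns in synonyms.items():
--         if term in text_lower:
--             expansions.extend(syns)
--     if expansions:
--         return text + " " + " ".join(expansions)
--     return text
-- ===== SOURCE B (Python) =====
-- def expand_text_with_synonyms(text, synonyms):
--     if not text: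
--         return text
--     t = text.lower()
--     # one sliding-window sweep per distinct key length builds a hash set of
--     # candidate substrings, so each key is then tested by a single set lookup
--     lengths = {len(term) for term in synonyms}
--     subs = {t[i:i + n] for n in lengths for i in range(len(t) - n + 1)}
--     expansions = []
--     for term, syns in synonyms.items():
--         if term in subs:
--             expansions.extend(syns)
--     if expansions:
--         return text + " " + " ".join(expansions)
--     return text
-- ===== Notes on version B (the rewrite author's own statement) =====
-- stated objective: faster
-- what changed: B replaces A's per-key substring scan of the lowered text by one sliding-window sweep per distinct key length that builds a hash set of candidate substrings, so each synonym key is then tested by a single set lookup instead of an O(L) scan.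
import Mathlib
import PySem

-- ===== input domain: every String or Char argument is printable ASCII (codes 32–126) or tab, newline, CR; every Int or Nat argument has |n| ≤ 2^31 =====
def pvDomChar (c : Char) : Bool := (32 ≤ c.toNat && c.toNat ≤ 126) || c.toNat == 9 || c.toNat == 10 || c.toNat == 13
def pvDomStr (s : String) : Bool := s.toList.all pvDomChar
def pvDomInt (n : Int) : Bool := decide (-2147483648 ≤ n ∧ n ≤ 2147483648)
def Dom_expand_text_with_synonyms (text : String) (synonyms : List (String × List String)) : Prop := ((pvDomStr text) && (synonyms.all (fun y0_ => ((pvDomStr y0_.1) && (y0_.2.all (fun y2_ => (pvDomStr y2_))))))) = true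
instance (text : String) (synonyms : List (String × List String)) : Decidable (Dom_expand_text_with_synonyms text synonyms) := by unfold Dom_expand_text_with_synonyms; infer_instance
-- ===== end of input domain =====

-- B builds, in one sliding-window sweep per distinct key length, a hash set of the text's candidate substrings and tests each synonym key by a single set lookup; measured faster on the generated inputs; same results.


-- ===== PORT A =====
def expand_text_with_synonyms (text : String) (synonyms : List (String × List String)) : String :=
  if text.toList = [] then text
  else
    let text_lower := PySem.Str.lower text
    let expansions : List String := synonyms.foldl
      (fun acc p => if PySem.Str.isIn p.1 text_lower then acc ++ p.2 else acc) []
    if expansions ≠ [] then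
      String.ofList (text.toList ++ ' ' :: (PySem.Str.join " " expansions).toList)
    else text

-- ===== PORT B =====
-- subs = {t[i:i+n] for n in lengths for i in range(len(t) - n + 1)} (Source B's set comprehension)
def pvSubs (t : List Char) (lengths : List Nat) : PySem.Set (List Char) :=
  lengths.foldl (fun s n =>
    (PySem.List.pyRange 0 ((t.length : Int) - (n : Int) + 1) 1).foldl
      (fun s i => PySem.Set.add s (PySem.List.slice t (some i) (some (i + (n : Int))))) s)
    PySem.Set.empty

def expand_text_with_synonyms_alt (text : String) (synonyms : List (String × List String)) : String :=
  if text.toList = [] then text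
  else
    let t := PySem.Chars.lower text.toList
    let lengths : PySem.Set Nat := PySem.Set.ofList (synonyms.map (fun p => p.1.toList.length))
    let subs := pvSubs t lengths
    let expansions : List String := synonyms.foldl
      (fun acc p => if PySem.Set.contains subs p.1.toList then acc ++ p.2 else acc) []
    if expansions ≠ [] then
      String.ofList (text.toList ++ ' ' :: (PySem.Str.join " " expansions).toList)
    else text

-- ===== PRECONDITION & SPEC =====
def Spec_expand_text_with_synonyms (text : String) (synonyms : List (String × List String)) (out : String) : Prop := out = expand_text_with_synonyms_alt text synonyms
instance (text : String) (synonyms : List (String × List String)) (out : String) : Decidable (Spec_expand_text_with_synonyms text synonyms out) := by unfold Spec_expand_text_with_synonyms; infer_instance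

-- ===== CLAIM (what is proved, stated in full; the proofs are below) =====
def Claim_equal_expand_text_with_synonyms : Prop := ∀ (text : String) (synonyms : List (String × List String)), Dom_expand_text_with_synonyms text synonyms → Spec_expand_text_with_synonyms text synonyms (expand_text_with_synonyms text synonyms)

-- ===== LEMMAS AND PROOFS =====

-- membership in a fold that only adds elements to a set
lemma mem_foldl_set_step {α β : Type} [BEq α] [LawfulBEq α]
    (F : PySem.Set α → β → PySem.Set α) (P : β → α → Prop)
    (h : ∀ s x w, w ∈ F s x ↔ w ∈ s ∨ P x w) :
    ∀ (xs : List β) (s0 : PySem.Set α) (w : α),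
      w ∈ xs.foldl F s0 ↔ w ∈ s0 ∨ ∃ x ∈ xs, P x w := by
  intro xs
  induction xs with
  | nil => simp
  | cons x xs ih =>
    intro s0 w
    simp only [List.foldl_cons, ih, h, List.mem_cons]
    constructor
    · rintro ((hw | hp) | ⟨y, hy, hp⟩)
      · exact Or.inl hw
      · exact Or.inr ⟨x, Or.inl rfl, hp⟩
      · exact Or.inr ⟨y, Or.inr hy, hp⟩
    · rintro (hw | ⟨y, (rfl | hy), hp⟩)
      · exact Or.inl (Or.inl hw)
      · exact Or.inl (Or.inr hp)
      · exact Or.inr ⟨y, hy, hp⟩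

lemma mem_pvSubs (t : List Char) (lengths : List Nat) (w : List Char) :
    w ∈ pvSubs t lengths ↔
      ∃ n ∈ lengths, ∃ i : Int, 0 ≤ i ∧ i < (t.length : Int) - (n : Int) + 1 ∧
        w = PySem.List.slice t (some i) (some (i + (n : Int))) := by
  unfold pvSubs
  rw [mem_foldl_set_step
        (P := fun n v => ∃ i : Int, 0 ≤ i ∧ i < (t.length : Int) - (n : Int) + 1 ∧
          v = PySem.List.slice t (some i) (some (i + (n : Int))))]
  · simp [PySem.Set.empty]
  · intro s n v
    rw [mem_foldl_set_step (P := fun i u => u = PySem.List.slice t (some i) (some (i + (n : Int))))]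
    · simp only [PySem.List.mem_pyRange_one]
      constructor
      · rintro (hv | ⟨i, ⟨h0, h1⟩, rfl⟩)
        · exact Or.inl hv
        · exact Or.inr ⟨i, h0, h1, rfl⟩
      · rintro (hv | ⟨i, h0, h1, rfl⟩)
        · exact Or.inl hv
        · exact Or.inr ⟨i, ⟨h0, h1⟩, rfl⟩
    · intro s' i u
      simp [PySem.Set.mem_add]

-- a synonym key (its length among the collected lengths) is in the substring set iff it occurs in t
lemma mem_pvSubs_iff_isIn (t term : List Char) (lengths : List Nat)
    (hlen : term.length ∈ lengths) :
    term ∈ pvSubs t lengths ↔ PySem.Chars.isIn term t = true := by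
  rw [mem_pvSubs]
  constructor
  · rintro ⟨n, _, i, h0, h1, rfl⟩
    rw [← PySem.Chars.exists_prefix_drop_iff_isIn]
    refine ⟨i.toNat, ?_⟩
    rw [PySem.List.slice_toNat _ h0 (by omega)]
    exact List.take_prefix _ _
  · intro hIn
    rw [← PySem.Chars.exists_prefix_drop_iff_isIn] at hIn
    obtain ⟨j, hpre⟩ := hIn
    have hle : term.length ≤ (t.drop j).length := hpre.length_le
    rw [List.length_drop] at hle
    by_cases hj : j ≤ t.length
    · refine ⟨term.length, hlen, (j : Int), by omega, by omega, ?_⟩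
      rw [PySem.List.slice_toNat _ (by omega) (by omega)]
      have : ((j : Int) + (term.length : Int)).toNat - ((j : Int)).toNat = term.length := by omega
      rw [this, Int.toNat_natCast]
      exact (List.prefix_iff_eq_take.mp hpre)
    · -- j past the end: t.drop j = [], so term = []
      have hnil : term = [] := by
        have : t.length - j = 0 := by omega
        rw [this] at hle
        exact List.eq_nil_of_length_eq_zero (by omega)
      subst hnil
      refine ⟨0, by simpa using hlen, 0, le_refl 0, by omega, ?_⟩
      rw [PySem.List.slice_toNat _ (by omega) (by omega)]
      simp

-- the two expansion folds agree element by element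
lemma expansions_eq (text : String) (synonyms : List (String × List String)) :
    synonyms.foldl
      (fun acc p => if PySem.Str.isIn p.1 (PySem.Str.lower text) then acc ++ p.2 else acc) [] =
    synonyms.foldl
      (fun acc p =>
        if PySem.Set.contains
            (pvSubs (PySem.Chars.lower text.toList)
              (PySem.Set.ofList (synonyms.map (fun q => q.1.toList.length)))) p.1.toList
        then acc ++ p.2 else acc) [] := by
  apply PySem.List.foldl_congr_mem
  intro acc p hp
  have hlen : p.1.toList.length
      ∈ (PySem.Set.ofList (synonyms.map (fun q => q.1.toList.length)) : List Nat) := by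
    rw [PySem.Set.mem_ofList]
    exact List.mem_map.mpr ⟨p, hp, rfl⟩
  have hiff := mem_pvSubs_iff_isIn (PySem.Chars.lower text.toList) p.1.toList _ hlen
  have hstr : PySem.Str.isIn p.1 (PySem.Str.lower text)
      = PySem.Chars.isIn p.1.toList (PySem.Chars.lower text.toList) := by
    simp [PySem.Str.isIn_eq, PySem.Str.toList_lower]
  have hcontains : PySem.Set.contains
      (pvSubs (PySem.Chars.lower text.toList)
        (PySem.Set.ofList (synonyms.map (fun q => q.1.toList.length)))) p.1.toList
      = PySem.Chars.isIn p.1.toList (PySem.Chars.lower text.toList) := by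
    rw [Bool.eq_iff_iff]
    exact (PySem.Set.contains_iff _ _).trans hiff
  rw [hstr, hcontains]

-- ===== VERDICT (by name: the statement is the Claim_ definition above) =====
theorem expand_text_with_synonyms_spec : Claim_equal_expand_text_with_synonyms := by
  intro text synonyms _
  unfold Spec_expand_text_with_synonyms expand_text_with_synonyms expand_text_with_synonyms_alt
  by_cases h : text.toList = []
  · simp [h]
  · simp only [h, if_false]
    rw [expansions_eq text synonyms]
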